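-- pv_equiv track=rewrite | github.com/Mark-Mulligan/advent-of-code-2023 | day12/part1.py | get_all_valid_combinations
-- ===== SOURCE A (Python) =====
-- def get_all_valid_combinations(springs, all_combinations):
--     valid_combinations = []
--
--     for combination in all_combinations:
--         combination_valid = True
--         for i, item in enumerate(springs):
--             if item in ['#', '.'] and combination[i] != item:
--                 combination_valid = False
--                 break
--
--         if combination_valid:
--             valid_combinations.append(combination)
--
--     return valid_combinations
-- ===== SOURCE B (Python) =====
-- def get_all_valid_combinations(springs, all_combinations):
--     # Sieve: sweep the template once; at each fixed position, narrow the
--     # surviving candidate list to those matching that single position.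
--     candidates = list(all_combinations)
--     for i, item in enumerate(springs):
--         if item in ('#', '.'):
--             candidates = [c for c in candidates if c[i] == item]
--     return candidates
-- ===== Notes on version B (the rewrite author's own statement) =====
-- stated objective: faster
-- what changed: B transposes the loop nest: it sweeps the springs template once and at each fixed position narrows the surviving candidate list with a single-position list-comprehension filter (a staged sieve), instead of A's per-candidate interpreted rescan of the template with a flag-and-break inner loop; timing measured B faster.
import Mathlib
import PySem

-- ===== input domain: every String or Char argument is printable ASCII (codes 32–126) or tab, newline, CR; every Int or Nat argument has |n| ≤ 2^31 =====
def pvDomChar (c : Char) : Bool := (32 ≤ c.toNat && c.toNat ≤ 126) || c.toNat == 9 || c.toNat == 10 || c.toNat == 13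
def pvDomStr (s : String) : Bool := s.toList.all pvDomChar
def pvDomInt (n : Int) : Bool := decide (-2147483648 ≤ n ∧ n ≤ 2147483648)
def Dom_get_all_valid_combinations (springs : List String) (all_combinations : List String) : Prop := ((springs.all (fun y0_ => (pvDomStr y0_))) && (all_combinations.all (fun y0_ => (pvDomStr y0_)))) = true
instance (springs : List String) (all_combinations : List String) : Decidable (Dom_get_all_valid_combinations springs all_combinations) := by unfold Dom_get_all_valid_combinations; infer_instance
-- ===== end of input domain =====

-- B transposes the loop nest: one sweep over the springs template, narrowing the surviving
-- candidate list at each fixed position (staged sieve); return values proved equal on Pre_.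


-- ===== PORT A =====
-- inner 'for i, item in enumerate(springs): … break' as structural recursion with early exit;
-- 'none' from pyGet? marks Python's IndexError (excluded by Pre_)
def pvCheckA (combination : String) : List (Int × String) → Bool
  | [] => true
  | (i, item) :: rest =>
    if item = "#" ∨ item = "." then
      match PySem.Str.pyGet? combination i with
      | some ch => if String.singleton ch ≠ item then false else pvCheckA combination rest
      | none => false
    else pvCheckA combination rest

def get_all_valid_combinations (springs : List String) (all_combinations : List String) : List String :=
  all_combinations.foldl
    (fun valid_combinations combination =>
      if pvCheckA combination (PySem.List.enumerate springs) then
        valid_combinations ++ [combination]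
      else valid_combinations) []

-- ===== PORT B =====
-- one step of the sieve: '[c for c in candidates if c[i] == item]' at a fixed position
def pvSieveStep (candidates : List String) (p : Int × String) : List String :=
  if p.2 = "#" ∨ p.2 = "." then
    candidates.filter (fun c =>
      match PySem.Str.pyGet? c p.1 with
      | some ch => String.singleton ch == p.2
      | none => false)
  else candidates

def get_all_valid_combinations_alt (springs : List String) (all_combinations : List String) : List String :=
  (PySem.List.enumerate springs).foldl pvSieveStep all_combinations

-- ===== PRECONDITION & SPEC =====
-- Pre_ excludes exactly the inputs on which both Pythons raise IndexError: a combination shorter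
-- than some fixed position that is not saved by an earlier in-range fixed mismatch.
def Pre_get_all_valid_combinations (springs : List String) (all_combinations : List String) : Prop :=
  ∀ c ∈ all_combinations, ∀ i < springs.length,
    (springs.getD i "" = "#" ∨ springs.getD i "" = ".") → c.toList.length ≤ i →
    ∃ j < i, (springs.getD j "" = "#" ∨ springs.getD j "" = ".") ∧ j < c.toList.length ∧
      String.singleton (c.toList.getD j ' ') ≠ springs.getD j ""
instance (springs : List String) (all_combinations : List String) : Decidable (Pre_get_all_valid_combinations springs all_combinations) := by unfold Pre_get_all_valid_combinations; infer_instance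

def pvWitness_get_all_valid_combinations : List String × List String := (["#", "?", "."], ["#x.", "...", "#a."])

def Spec_get_all_valid_combinations (springs : List String) (all_combinations : List String) (out : List String) : Prop := out = get_all_valid_combinations_alt springs all_combinations
instance (springs : List String) (all_combinations : List String) (out : List String) : Decidable (Spec_get_all_valid_combinations springs all_combinations out) := by unfold Spec_get_all_valid_combinations; infer_instance

-- ===== CLAIM (what is proved, stated in full; the proofs are below) =====
def Claim_equal_get_all_valid_combinations : Prop := ∀ (springs : List String) (all_combinations : List String), Dom_get_all_valid_combinations springs all_combinations → Pre_get_all_valid_combinations springs all_combinations → Spec_get_all_valid_combinations springs all_combinations (get_all_valid_combinations springs all_combinations)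

-- ===== LEMMAS AND PROOFS =====
-- the per-position predicate of one sieve stage, as a function of the stage
def pvPred (p : Int × String) (c : String) : Bool :=
  if p.2 = "#" ∨ p.2 = "." then
    match PySem.Str.pyGet? c p.1 with
    | some ch => String.singleton ch == p.2
    | none => false
  else true

-- A's short-circuit check equals the plain conjunction of the per-position predicates
lemma pvCheckA_eq_all (c : String) (l : List (Int × String)) :
    pvCheckA c l = l.all (fun p => pvPred p c) := by
  induction l with
  | nil => rfl
  | cons p rest ih =>
    obtain ⟨i, item⟩ := p
    by_cases h : item = "#" ∨ item = "."
    · cases hg : PySem.Str.pyGet? c i with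
      | none => simp only [pvCheckA, hg, if_pos h, List.all_cons, pvPred]; simp [hg]
      | some ch =>
        by_cases hc : String.singleton ch = item <;>
          · simp only [pvCheckA, hg, if_pos h, List.all_cons, pvPred, ih]
            simp [hg, hc]
    · simp only [pvCheckA, if_neg h, List.all_cons, pvPred, ih]
      simp [h]

-- one sieve stage is a filter by that stage's predicate (also when the stage is skipped)
lemma pvSieveStep_eq_filter (xs : List String) (p : Int × String) :
    pvSieveStep xs p = xs.filter (pvPred p) := by
  obtain ⟨i, item⟩ := p
  by_cases h : item = "#" ∨ item = "."
  · simp only [pvSieveStep, if_pos h]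
    exact List.filter_congr (fun c _ => by simp [pvPred, h])
  · simp only [pvSieveStep, if_neg h]
    refine (List.filter_congr (fun c _ => ?_) (l := xs) ▸ (List.filter_true xs).symm)
    simp [pvPred, h]

-- the staged sieve over l equals one filter by the conjunction over l
lemma sieve_eq_filter_all (l : List (Int × String)) (xs : List String) :
    l.foldl pvSieveStep xs = xs.filter (fun c => l.all (fun p => pvPred p c)) := by
  induction l generalizing xs with
  | nil => simp
  | cons p rest ih =>
    simp only [List.foldl_cons, ih, pvSieveStep_eq_filter, List.filter_filter, List.all_cons]
    exact List.filter_congr (fun c _ => by rw [Bool.and_comm])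

-- ===== VERDICT (by name: the statement is the Claim_ definition above) =====
theorem get_all_valid_combinations_spec : Claim_equal_get_all_valid_combinations := by
  intro springs all_combinations _ _
  unfold Spec_get_all_valid_combinations get_all_valid_combinations get_all_valid_combinations_alt
  rw [PySem.List.foldl_append_if_eq_filter, sieve_eq_filter_all]
  simp only [List.nil_append]
  exact List.filter_congr (fun c _ => by rw [pvCheckA_eq_all])
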